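-- pv_equiv track=rewrite | github.com/amazon-science/RefChecker | refchecker/aggregator.py | strict_agg
-- ===== SOURCE A (Python) =====
-- def strict_agg(results):
--     """Aggregate results by zero-tolerance on negative labels."""
--     if not results:
--         return "Abstain"
--     ret = "Entailment"
--     for result in results:
--         if result == "Contradiction":
--             return "Contradiction"
--         if result == "Neutral":
--             ret = "Neutral"
--     return ret
-- ===== SOURCE B (Python) =====
-- def strict_agg(results):
--     """Aggregate results by zero-tolerance on negative labels."""
--     if not results:
--         return "Abstain"
--     if "Contradiction" in results:
--         return "Contradiction"
--     if "Neutral" in results: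
--         return "Neutral"
--     return "Entailment"
-- ===== Notes on version B (the rewrite author's own statement) =====
-- stated objective: simpler
-- what changed: Replaced the stateful accumulator loop with two direct membership tests in priority order (Contradiction, then Neutral), removing the mutable ret variable.
import Mathlib
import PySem

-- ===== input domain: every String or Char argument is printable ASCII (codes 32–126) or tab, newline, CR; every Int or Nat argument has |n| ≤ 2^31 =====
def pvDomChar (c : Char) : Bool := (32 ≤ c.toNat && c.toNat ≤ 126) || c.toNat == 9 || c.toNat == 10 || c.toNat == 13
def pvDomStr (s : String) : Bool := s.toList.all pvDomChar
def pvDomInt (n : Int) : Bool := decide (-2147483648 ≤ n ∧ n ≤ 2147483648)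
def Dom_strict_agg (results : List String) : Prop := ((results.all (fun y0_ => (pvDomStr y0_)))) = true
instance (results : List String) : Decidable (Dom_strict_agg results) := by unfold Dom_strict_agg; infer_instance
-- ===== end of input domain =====

-- B replaces A's accumulator loop by two priority-ordered membership tests (simpler decomposition).


-- ===== PORT A =====
-- loop of A: recursion over the list carrying the accumulator `ret`
def strict_agg_loop (results : List String) (ret : String) : String :=
  match results with
  | [] => ret
  | r :: rest =>
    if r = "Contradiction" then "Contradiction"
    else if r = "Neutral" then strict_agg_loop rest "Neutral"
    else strict_agg_loop rest ret

def strict_agg (results : List String) : String :=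
  if results = [] then "Abstain"
  else strict_agg_loop results "Entailment"

-- ===== PORT B =====
def strict_agg_alt (results : List String) : String :=
  if results = [] then "Abstain"
  else if results.contains "Contradiction" then "Contradiction"
  else if results.contains "Neutral" then "Neutral"
  else "Entailment"

-- ===== PRECONDITION & SPEC =====
def Spec_strict_agg (results : List String) (out : String) : Prop := out = strict_agg_alt results
instance (results : List String) (out : String) : Decidable (Spec_strict_agg results out) := by unfold Spec_strict_agg; infer_instance

-- ===== CLAIM (what is proved, stated in full; the proofs are below) =====
def Claim_equal_strict_agg : Prop := ∀ (results : List String), Dom_strict_agg results → Spec_strict_agg results (strict_agg results)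

-- ===== LEMMAS AND PROOFS =====

-- ===== VERDICT (by name: the statement is the Claim_ definition above) =====
-- the loop with accumulator ret ∈ {Entailment, Neutral} equals the membership formulation
theorem strict_agg_loop_eq (results : List String) (ret : String)
    (h : ret = "Entailment" ∨ ret = "Neutral") :
    strict_agg_loop results ret =
      if results.contains "Contradiction" then "Contradiction"
      else if results.contains "Neutral" then "Neutral"
      else ret := by
  induction results generalizing ret with
  | nil => simp [strict_agg_loop]
  | cons r rest ih =>
    simp only [strict_agg_loop, List.contains_cons]
    by_cases hc : r = "Contradiction"
    · simp [hc]
    · by_cases hn : r = "Neutral"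
      · subst hn
        rw [ih "Neutral" (Or.inr rfl)]
        rcases h with h | h <;> subst h <;> simp [hc]
      · rw [ih ret h]
        simp [hc, hn, Ne.symm hc, Ne.symm hn]

theorem strict_agg_spec : Claim_equal_strict_agg := by
  intro results _
  unfold Spec_strict_agg strict_agg strict_agg_alt
  by_cases h : results = []
  · simp [h]
  · simp only [h, if_false]
    rw [strict_agg_loop_eq results "Entailment" (Or.inl rfl)]
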